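-- pv_equiv track=rewrite | github.com/Radhika-Goel/pycharm | Builder/venv/EDX/GreedyALgo/ExampleTotestTime.py | efficientAlgorithm
-- ===== SOURCE A (Python) =====
-- def efficientAlgorithm(values):
--     m, n = values
--     m += 1
--     n += 1
--
--     k, a, b, addition = 1, 0, 1, 0
--
--     while k <= n:
--         a, b = (b, (a + b) % 10) if k > 2 else (a, b)
--         if k >= m:
--             addition += (b if k > 2 else (a if k == 1 else (b if k == 2 else 0)))
--         k += 1
--     return addition % 10 if n != 1 else a
-- ===== SOURCE B (Python) =====
-- # Pisano-period(60) prefix-sum table of Fibonacci last digits: PRE[j] = sum of F(0..j-1) % 10.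
-- PRE = [0, 0, 1, 2, 4, 7, 12, 20, 23, 24, 28, 33, 42, 46, 49, 56, 56, 63, 70, 74,
--        75, 80, 86, 87, 94, 102, 107, 110, 118, 119, 128, 128, 137, 146, 154, 161,
--        166, 168, 175, 184, 190, 195, 196, 202, 209, 212, 212, 215, 218, 224, 233,
--        238, 242, 251, 254, 256, 261, 268, 270, 279, 280]
--
-- def efficientAlgorithm(values):
--     m, n = values
--     if n < 0:
--         return 0
--     lo = m if m > 0 else 0
--     if lo > n:
--         return 0
--     def S(j):
--         return (j // 60) * PRE[60] + PRE[j % 60]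
--     return (S(n + 1) - S(lo)) % 10
-- ===== Notes on version B (the rewrite author's own statement) =====
-- stated objective: faster
-- what changed: Replaces A's iteration over every Fibonacci index up to n with an O(1) range-sum lookup in a precomputed Pisano-period-60 prefix-sum table of Fibonacci last digits.
import Mathlib
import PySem

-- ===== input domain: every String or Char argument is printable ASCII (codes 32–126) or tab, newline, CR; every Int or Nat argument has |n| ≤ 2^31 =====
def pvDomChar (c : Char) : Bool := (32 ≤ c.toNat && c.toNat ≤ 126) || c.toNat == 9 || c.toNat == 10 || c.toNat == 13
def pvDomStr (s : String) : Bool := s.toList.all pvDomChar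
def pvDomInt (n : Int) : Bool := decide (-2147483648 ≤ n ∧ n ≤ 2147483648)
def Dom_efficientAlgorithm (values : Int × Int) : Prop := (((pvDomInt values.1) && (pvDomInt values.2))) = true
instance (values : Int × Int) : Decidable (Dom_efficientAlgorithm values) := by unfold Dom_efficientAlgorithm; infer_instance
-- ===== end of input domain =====

-- B replaces A's O(n) last-digit Fibonacci summation loop by an O(1) lookup in a
-- precomputed Pisano-period-60 prefix-sum table; they return the same value on every input.

-- ===== PORT A =====
-- the while-loop of A: fuel counts the remaining iterations (k runs 1..n)
def loopA (M : Int) : Nat → Int → Int → Int → Int → (Int × Int × Int × Int)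
  | 0, k, a, b, add => (k, a, b, add)
  | f+1, k, a, b, add =>
      let ab := if k > 2 then (b, PySem.Int.mod (a + b) 10) else (a, b)
      let add' := if k ≥ M then
          add + (if k > 2 then ab.2 else if k = 1 then ab.1 else if k = 2 then ab.2 else 0)
        else add
      loopA M f (k + 1) ab.1 ab.2 add'

def efficientAlgorithm (values : Int × Int) : Int :=
  let m := values.1 + 1
  let n := values.2 + 1
  -- while k <= n starting at k = 1: exactly n.toNat iterations
  let r := loopA m n.toNat 1 0 1 0
  if n ≠ 1 then PySem.Int.mod r.2.2.2 10 else r.2.1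

-- ===== PORT B =====
-- PRE[j] = sum of the first j Fibonacci last digits (Pisano period 60), as in Source B
def preTable : List Int :=
  [0, 0, 1, 2, 4, 7, 12, 20, 23, 24, 28, 33, 42, 46, 49, 56, 56, 63, 70, 74,
   75, 80, 86, 87, 94, 102, 107, 110, 118, 119, 128, 128, 137, 146, 154, 161,
   166, 168, 175, 184, 190, 195, 196, 202, 209, 212, 212, 215, 218, 224, 233,
   238, 242, 251, 254, 256, 261, 268, 270, 279, 280]

-- S(j) = (j // 60) * PRE[60] + PRE[j % 60]; indices are always in range in Source B, getD 0 is never used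
def bS (j : Int) : Int :=
  PySem.Int.floordiv j 60 * ((PySem.List.pyGet? preTable 60).getD 0)
    + (PySem.List.pyGet? preTable (PySem.Int.mod j 60)).getD 0

def efficientAlgorithm_alt (values : Int × Int) : Int :=
  let m := values.1
  let n := values.2
  if n < 0 then 0
  else
    let lo := if m > 0 then m else 0
    if lo > n then 0
    else PySem.Int.mod (bS (n + 1) - bS lo) 10

-- ===== PRECONDITION & SPEC =====
def Spec_efficientAlgorithm (values : Int × Int) (out : Int) : Prop := out = efficientAlgorithm_alt values
instance (values : Int × Int) (out : Int) : Decidable (Spec_efficientAlgorithm values out) := by unfold Spec_efficientAlgorithm; infer_instance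

-- ===== CLAIM (what is proved, stated in full; the proofs are below) =====
def Claim_equal_efficientAlgorithm : Prop := ∀ (values : Int × Int), Dom_efficientAlgorithm values → Spec_efficientAlgorithm values (efficientAlgorithm values)

-- ===== LEMMAS AND PROOFS =====

-- Fibonacci last digits
def fibd : Nat → Int
  | 0 => 0
  | 1 => 1
  | t + 2 => (fibd t + fibd (t + 1)) % 10

-- prefix sums of fibd
def Ssum : Nat → Int
  | 0 => 0
  | t + 1 => Ssum t + fibd t

-- sum of the terms A adds in its tail (k = j+3 .. j+2+f)
def tailSum (M : Int) : Nat → Nat → Int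
  | _, 0 => 0
  | j, f + 1 => (if ((j : Int) + 3) ≥ M then fibd (j + 2) else 0) + tailSum M (j + 1) f

-- conditional prefix-range sum: Σ_{t = s}^{s+f-1} [L ≤ t] fibd t
def condSum (L : Nat) : Nat → Nat → Int
  | _, 0 => 0
  | s, f + 1 => (if L ≤ s then fibd s else 0) + condSum L (s + 1) f

lemma loopA_tail (M : Int) : ∀ (f j : Nat) (add : Int),
    loopA M f ((j : Int) + 3) (fibd j) (fibd (j + 1)) add
      = ((j : Int) + 3 + f, fibd (j + f), fibd (j + f + 1), add + tailSum M j f) := by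
  intro f
  induction f with
  | zero => intro j add; simp [loopA, tailSum]
  | succ f ih =>
      intro j add
      have hgt : ((j : Int) + 3) > 2 := by omega
      have hfib : PySem.Int.mod (fibd j + fibd (j + 1)) 10 = fibd (j + 2) := by
        simp [fibd]
      simp only [loopA, if_pos hgt]
      have := ih (j + 1) (if ((j : Int) + 3) ≥ M then add + fibd (j + 2) else add)
      push_cast at this ⊢
      rw [hfib]
      rw [show (j : Int) + 3 + 1 = (j : Int) + 1 + 3 by ring] at *
      rw [this]
      simp only [Prod.mk.injEq]
      refine ⟨by ring, by rw [show j + 1 + f = j + (f + 1) by omega],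
        by rw [show j + 1 + f + 1 = j + (f + 1) + 1 by omega], ?_⟩
      simp only [tailSum]
      split_ifs <;> ring

lemma tailSum_eq_condSum (M : Int) : ∀ (f j : Nat),
    tailSum M j f = condSum (M.toNat - 1) (j + 2) f := by
  intro f
  induction f with
  | zero => intro j; simp [tailSum, condSum]
  | succ f ih =>
      intro j
      have hiff : (((j : Int) + 3) ≥ M) ↔ (M.toNat - 1 ≤ j + 2) := by omega
      simp only [tailSum, condSum, ih (j + 1)]
      rw [show j + 1 + 2 = j + 2 + 1 from by omega]
      congr 1
      by_cases h : ((j : Int) + 3) ≥ M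
      · rw [if_pos h, if_pos (hiff.mp h)]
      · rw [if_neg h, if_neg (fun hc => h (hiff.mpr hc))]

lemma Ssum_succ (t : Nat) : Ssum (t + 1) = Ssum t + fibd t := rfl

lemma condSum_eq (L : Nat) : ∀ (f s : Nat),
    condSum L s f = Ssum (s + f) - Ssum (max s (min L (s + f))) := by
  intro f
  induction f with
  | zero =>
      intro s
      have h : max s (min L (s + 0)) = s := by omega
      rw [h]
      simp [condSum]
  | succ f ih =>
      intro s
      simp only [condSum, ih (s + 1)]
      by_cases h : L ≤ s
      · rw [if_pos h]
        have h1 : max (s + 1) (min L (s + 1 + f)) = s + 1 := by omega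
        have h2 : max s (min L (s + (f + 1))) = s := by omega
        have h3 : s + 1 + f = s + (f + 1) := by omega
        rw [h1, h2, h3, Ssum_succ]
        ring
      · rw [if_neg h]
        have h1 : max (s + 1) (min L (s + 1 + f)) = max s (min L (s + (f + 1))) := by omega
        have h3 : s + 1 + f = s + (f + 1) := by omega
        rw [h1, h3]
        ring

-- periodicity of fibd with period 60
lemma fibd_period : ∀ t : Nat, fibd (t + 60) = fibd t ∧ fibd (t + 61) = fibd (t + 1) := by
  intro t
  induction t with
  | zero => constructor <;> decide
  | succ t ih =>
      obtain ⟨h1, h2⟩ := ih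
      refine ⟨h2, ?_⟩
      have e1 : t + 1 + 61 = (t + 60) + 2 := by omega
      have e2 : t + 61 = (t + 60) + 1 := by omega
      rw [e1, show fibd ((t+60)+2) = (fibd (t+60) + fibd ((t+60)+1)) % 10 from rfl,
        ← e2, h1, h2]
      rfl

lemma Ssum_add60 : ∀ t : Nat, Ssum (t + 60) = Ssum t + 280 := by
  intro t
  induction t with
  | zero => decide
  | succ t ih =>
      have e : t + 1 + 60 = (t + 60) + 1 := by omega
      rw [e, Ssum_succ, ih, (fibd_period t).1, Ssum_succ]
      ring

lemma Ssum_decomp : ∀ (q r : Nat), Ssum (60 * q + r) = (q : Int) * 280 + Ssum r := by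
  intro q
  induction q with
  | zero => intro r; simp
  | succ q ih =>
      intro r
      have e : 60 * (q + 1) + r = (60 * q + r) + 60 := by ring
      rw [e, Ssum_add60, ih]
      push_cast
      ring

lemma preTable_get : ∀ r : Nat, r < 61 → PySem.List.pyGet? preTable (r : Int) = some (Ssum r) := by
  decide

lemma bS_eq (j : Int) (hj : 0 ≤ j) : bS j = Ssum j.toNat := by
  have h60 : (0 : Int) < 60 := by omega
  have hq := PySem.Int.floordiv_mul_add_mod j 60
  have hr0 := PySem.Int.mod_nonneg j h60
  have hrlt := PySem.Int.mod_lt j h60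
  set q := PySem.Int.floordiv j 60 with hqdef
  set r := PySem.Int.mod j 60 with hrdef
  have hq0 : 0 ≤ q := by
    nlinarith [hrlt, hr0, hq, hj]
  have hrcast : r = ((r.toNat : Nat) : Int) := by omega
  have hget : PySem.List.pyGet? preTable r = some (Ssum r.toNat) := by
    rw [hrcast]
    exact preTable_get r.toNat (by omega)
  have hget60 : PySem.List.pyGet? preTable 60 = some (Ssum 60) := by
    have := preTable_get 60 (by omega)
    simpa using this
  have hjdec : j.toNat = 60 * q.toNat + r.toNat := by omega
  unfold bS
  rw [← hqdef, ← hrdef, hget, hget60, hjdec, Ssum_decomp]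
  have h280 : Ssum 60 = 280 := by decide
  have hqq : ((q.toNat : Nat) : Int) = q := by omega
  rw [h280, hqq]
  simp

-- evaluate the first two iterations of A's loop
lemma loopA_two (M : Int) (f : Nat) :
    loopA M (f + 2) 1 0 1 0
      = loopA M f 3 0 1 (if (2 : Int) ≥ M then (if (1 : Int) ≥ M then (0:Int) + 0 else 0) + 1 else (if (1 : Int) ≥ M then (0:Int) + 0 else 0)) := by
  simp only [loopA]
  norm_num

-- the A-loop's total addition, in closed form
lemma loopA_add_eq (M : Int) (f : Nat) :
    (loopA M (f + 2) 1 0 1 0).2.2.2 = condSum (M.toNat - 1) 0 (f + 2) := by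
  rw [loopA_two]
  have h0 : (if (1 : Int) ≥ M then (0:Int) + 0 else 0) = 0 := by split_ifs <;> ring
  have h01 : (if (2 : Int) ≥ M then (0:Int) + 1 else 0) = (if (2 : Int) ≥ M then (1:Int) else 0) := by
    split_ifs <;> ring
  rw [h0, h01]
  have := loopA_tail M f 0 (if (2 : Int) ≥ M then (1:Int) else 0)
  simp only [Nat.cast_zero, zero_add] at this
  rw [show (fibd 0) = 0 from rfl, show (fibd 1) = 1 from rfl] at this
  rw [this]
  simp only [tailSum_eq_condSum]
  simp only [condSum]
  have h1 : (if M.toNat - 1 ≤ 0 then fibd 0 else 0) = 0 := by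
    split_ifs <;> rfl
  have h2 : (if M.toNat - 1 ≤ 1 then fibd 1 else 0) = (if (2 : Int) ≥ M then (1:Int) else 0) := by
    have : (M.toNat - 1 ≤ 1) ↔ ((2 : Int) ≥ M) := by omega
    by_cases h : (2 : Int) ≥ M
    · rw [if_pos h, if_pos (this.mpr h)]; rfl
    · rw [if_neg h, if_neg (fun hc => h (this.mp hc))]
  rw [h1, h2, show 0 + 1 + 1 = 2 from rfl]
  ring

-- ===== VERDICT (by name: the statement is the Claim_ definition above) =====
theorem efficientAlgorithm_spec : Claim_equal_efficientAlgorithm := by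
  unfold Claim_equal_efficientAlgorithm
  intro ⟨m, n⟩ _
  unfold Spec_efficientAlgorithm efficientAlgorithm efficientAlgorithm_alt
  simp only []
  by_cases hn : n < 0
  · -- loop runs zero times
    have h0 : (n + 1).toNat = 0 := by omega
    have hne : n + 1 ≠ 1 := by omega
    rw [h0, if_pos hne, if_pos hn]
    simp [loopA]
  · replace hn : 0 ≤ n := by omega
    rw [if_neg (by omega : ¬ n < 0)]
    set lo : Int := if m > 0 then m else 0 with hlo
    have hlo0 : 0 ≤ lo := by rw [hlo]; split_ifs <;> omega
    have hL : (m + 1).toNat - 1 = lo.toNat := by rw [hlo]; split_ifs <;> omega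
    by_cases hn0 : n = 0
    · -- A returns a = 0; B returns 0 on both branches
      subst hn0
      have h1 : ((0 : Int) + 1).toNat = 1 := by decide
      rw [h1, if_neg (by norm_num : ¬ ((0:Int) + 1 ≠ 1))]
      simp only [loopA]
      norm_num
      intro hle
      rw [show lo = (0:Int) from by omega, bS_eq 1 (by omega), bS_eq 0 (by omega)]
      decide
    · -- n ≥ 1: A returns addition % 10
      have hne : n + 1 ≠ 1 := by omega
      rw [if_pos hne]
      have hf : (n + 1).toNat = ((n + 1).toNat - 2) + 2 := by omega
      rw [hf, loopA_add_eq, condSum_eq, hL]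
      have hsz : 0 + (((n + 1).toNat - 2) + 2) = (n + 1).toNat := by omega
      rw [hsz]
      by_cases hgt : lo > n
      · rw [if_pos hgt]
        have : max 0 (min lo.toNat (n + 1).toNat) = (n + 1).toNat := by omega
        rw [this]
        simp [PySem.Int.mod]
      · rw [if_neg hgt]
        replace hgt : lo ≤ n := by omega
        have : max 0 (min lo.toNat (n + 1).toNat) = lo.toNat := by omega
        rw [this, bS_eq (n + 1) (by omega), bS_eq lo hlo0]
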